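-- pv_equiv track=rewrite | github.com/Nayananga/AI-BasedThreadPoolTuningModel | general_utilities/data_generator.py | find_initial_min_point_with_feature
-- ===== SOURCE A (Python) =====
-- def find_initial_min_point_with_feature(threadpool_data, target_data, feature_data):
--     min_threadpool_data = []
--     min_target_data = []
--     min_feature_data = []
--     for i, target_value in enumerate(target_data):
--         if target_value not in min_target_data:
--             minimum_threadpool_size = min(
--                 [threadpool_data[i] for i, feature_data_value in enumerate(target_data) if
--                  feature_data_value == target_value])
--
--             min_threadpool_data.append(minimum_threadpool_size)
--             min_target_data.append(target_value)
--             min_feature_data.append(feature_data[threadpool_data.index(minimum_threadpool_size)])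
--
--         else:
--             pass
--
--     return min_threadpool_data, min_target_data, min_feature_data
-- ===== SOURCE B (Python) =====
-- def find_initial_min_point_with_feature(threadpool_data, target_data, feature_data):
--     # one pass: per-target running minimum in first-occurrence order
--     mins = {}
--     for t, v in zip(target_data, threadpool_data):
--         if t not in mins or v < mins[t]:
--             mins[t] = v
--     # one pass: first index of each threadpool value
--     first_index = {}
--     for i, v in enumerate(threadpool_data):
--         if v not in first_index:
--             first_index[v] = i
--     min_threadpool_data = list(mins.values())
--     return (min_threadpool_data, list(mins.keys()),
--             [feature_data[first_index[m]] for m in min_threadpool_data])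
-- ===== Notes on version B (the rewrite author's own statement) =====
-- stated objective: faster
-- what changed: Replaced the per-unique-target rescans (a full list comprehension over target_data plus threadpool_data.index for every new target) by two single passes: an insertion-ordered dict keeping each target's running minimum and a value->first-index dict for the feature lookup.
-- outside the precondition, e.g. on find_initial_min_point_with_feature([1, 2], [5, 5], [9]): A returns ([1], [5], [9]), B returns ([1], [5], [9])
import Mathlib
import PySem

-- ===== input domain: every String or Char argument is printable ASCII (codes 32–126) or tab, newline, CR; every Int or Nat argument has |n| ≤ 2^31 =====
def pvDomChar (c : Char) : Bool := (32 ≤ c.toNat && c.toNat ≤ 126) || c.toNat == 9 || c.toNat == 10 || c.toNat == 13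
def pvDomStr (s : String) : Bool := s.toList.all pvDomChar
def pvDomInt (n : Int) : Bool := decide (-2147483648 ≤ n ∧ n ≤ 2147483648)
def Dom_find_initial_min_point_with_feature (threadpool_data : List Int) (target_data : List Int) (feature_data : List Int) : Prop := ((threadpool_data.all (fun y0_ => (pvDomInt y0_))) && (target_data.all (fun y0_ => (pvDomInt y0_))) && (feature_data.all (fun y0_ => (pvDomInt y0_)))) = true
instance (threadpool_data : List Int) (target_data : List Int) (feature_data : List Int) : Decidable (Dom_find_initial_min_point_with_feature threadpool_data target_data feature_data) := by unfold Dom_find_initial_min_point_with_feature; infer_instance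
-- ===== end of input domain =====

-- B replaces A's per-unique-target rescans by two single passes (an insertion-ordered running-minimum
-- dict and a value->first-index dict); the proof shows the return values agree on Pre_.
-- ===== PORT A =====
def find_initial_min_point_with_feature (threadpool_data : List Int) (target_data : List Int) (feature_data : List Int) : List Int × List Int × List Int :=
  (PySem.List.enumerate target_data).foldl
    (fun acc p =>
      if acc.2.1.contains p.2 then acc
      else
        let cand := ((PySem.List.enumerate target_data).filter (fun q => q.2 == p.2)).map
          (fun q => (PySem.List.pyGet? threadpool_data q.1).getD 0)
        let m := (PySem.List.min? cand (fun y => y)).getD 0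
        (acc.1 ++ [m], acc.2.1 ++ [p.2],
          acc.2.2 ++ [(PySem.List.pyGet? feature_data
            (((PySem.List.index? threadpool_data m).getD 0 : Nat) : Int)).getD 0]))
    ([], [], [])

-- ===== PORT B =====
def find_initial_min_point_with_feature_alt (threadpool_data : List Int) (target_data : List Int) (feature_data : List Int) : List Int × List Int × List Int :=
  let mins : PySem.Dict Int Int :=
    (target_data.zip threadpool_data).foldl
      (fun d q =>
        match d.get? q.1 with
        | none => d.insert q.1 q.2
        | some v0 => if q.2 < v0 then d.insert q.1 q.2 else d)
      PySem.Dict.empty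
  let firstIndex : PySem.Dict Int Int :=
    (PySem.List.enumerate threadpool_data).foldl
      (fun d q => if d.contains q.2 then d else d.insert q.2 q.1)
      PySem.Dict.empty
  let min_threadpool_data := mins.values
  (min_threadpool_data, mins.keys,
    min_threadpool_data.map
      (fun m => (PySem.List.pyGet? feature_data ((firstIndex.get? m).getD 0)).getD 0))

-- ===== PRECONDITION & SPEC =====
-- Pre_ is the natural parallel-columns domain: target_data no longer than threadpool_data and
-- feature_data.  Outside it A raises IndexError except when every data-dependent first index of a
-- minimum happens to stay below len(feature_data); on those returning inputs B agrees anyway (cited).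
def Pre_find_initial_min_point_with_feature (threadpool_data : List Int) (target_data : List Int) (feature_data : List Int) : Prop :=
  target_data.length ≤ threadpool_data.length ∧ target_data.length ≤ feature_data.length
instance (threadpool_data : List Int) (target_data : List Int) (feature_data : List Int) : Decidable (Pre_find_initial_min_point_with_feature threadpool_data target_data feature_data) := by unfold Pre_find_initial_min_point_with_feature; infer_instance
def pvWitness_find_initial_min_point_with_feature : List Int × List Int × List Int := ([3, 1, 2], [7, 7, 8], [10, 11, 12])
def Spec_find_initial_min_point_with_feature (threadpool_data : List Int) (target_data : List Int) (feature_data : List Int) (out : List Int × List Int × List Int) : Prop := out = find_initial_min_point_with_feature_alt threadpool_data target_data feature_data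
instance (threadpool_data : List Int) (target_data : List Int) (feature_data : List Int) (out : List Int × List Int × List Int) : Decidable (Spec_find_initial_min_point_with_feature threadpool_data target_data feature_data out) := by unfold Spec_find_initial_min_point_with_feature; infer_instance

-- ===== CLAIM (what is proved, stated in full; the proofs are below) =====
def Claim_equal_find_initial_min_point_with_feature : Prop := ∀ (threadpool_data : List Int) (target_data : List Int) (feature_data : List Int), Dom_find_initial_min_point_with_feature threadpool_data target_data feature_data → Pre_find_initial_min_point_with_feature threadpool_data target_data feature_data → Spec_find_initial_min_point_with_feature threadpool_data target_data feature_data (find_initial_min_point_with_feature threadpool_data target_data feature_data)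

-- ===== LEMMAS AND PROOFS =====

def pvNew (seen : List Int) : List Int → List Int
  | [] => []
  | t :: r => if seen.contains t then pvNew seen r else t :: pvNew (seen ++ [t]) r

def pvMfold : List Int → Int
  | [] => 0
  | x :: r => r.foldl min x

def pvMinOf (ps : List (Int × Int)) (t : Int) : Int :=
  pvMfold ((ps.filter (fun q => q.1 == t)).map (fun q => q.2))

def pvFeat (threadpool_data feature_data : List Int) (m : Int) : Int :=
  (PySem.List.pyGet? feature_data (((PySem.List.index? threadpool_data m).getD 0 : Nat) : Int)).getD 0


-- the loop body of A, with the (input-only dependent) minimum and feature values abstracted out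
def pvStepA (mv fv : Int → Int) (acc : List Int × List Int × List Int) (tv : Int) : List Int × List Int × List Int :=
  if acc.2.1.contains tv then acc else (acc.1 ++ [mv tv], acc.2.1 ++ [tv], acc.2.2 ++ [fv tv])

lemma pvMfold_append (xs : List Int) (v : Int) :
    pvMfold (xs ++ [v]) = if xs = [] then v else min (pvMfold xs) v := by
  cases xs with
  | nil => simp [pvMfold]
  | cons x r => simp [pvMfold, List.foldl_append]

lemma pvMin_getD (xs : List Int) :
    (PySem.List.min? xs (fun y => y)).getD 0 = pvMfold xs := by
  cases xs with
  | nil => simp [PySem.List.min?, pvMfold]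
  | cons x r => rw [PySem.List.min?_id_cons]; simp [pvMfold]

lemma pvNew_subset : ∀ (l seen : List Int) (x : Int), x ∈ pvNew seen l → x ∈ l := by
  intro l
  induction l with
  | nil => intro seen x h; simp [pvNew] at h
  | cons t r ih =>
    intro seen x h
    unfold pvNew at h
    by_cases hc : seen.contains t
    · rw [if_pos hc] at h; exact List.mem_cons_of_mem _ (ih seen x h)
    · rw [if_neg hc] at h
      rcases List.mem_cons.mp h with rfl | h
      · exact List.mem_cons_self
      · exact List.mem_cons_of_mem _ (ih _ x h)

lemma mem_pvNew : ∀ (l seen : List Int) (x : Int), x ∈ l → x ∈ seen ∨ x ∈ pvNew seen l := by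
  intro l
  induction l with
  | nil => intro seen x h; simp at h
  | cons t r ih =>
    intro seen x h
    unfold pvNew
    by_cases hc : seen.contains t
    · rw [if_pos hc]
      rcases List.mem_cons.mp h with rfl | h
      · exact Or.inl (List.contains_iff_mem.mp hc)
      · exact ih seen x h
    · rw [if_neg hc]
      rcases List.mem_cons.mp h with rfl | h
      · exact Or.inr (List.mem_cons_self)
      · rcases ih (seen ++ [t]) x h with h' | h'
        · rcases List.mem_append.mp h' with h'' | h''
          · exact Or.inl h''
          · simp at h''; subst h''; exact Or.inr List.mem_cons_self
        · exact Or.inr (List.mem_cons_of_mem _ h')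

lemma pvNew_append : ∀ (l seen : List Int) (t : Int),
    pvNew seen (l ++ [t]) = pvNew seen l ++ (if (seen ++ pvNew seen l).contains t then [] else [t]) := by
  intro l
  induction l with
  | nil => intro seen t; simp [pvNew]
  | cons u r ih =>
    intro seen t
    simp only [List.cons_append]
    unfold pvNew
    by_cases hc : seen.contains u
    · rw [if_pos hc, if_pos hc]; exact ih seen t
    · rw [if_neg hc, if_neg hc]
      rw [ih (seen ++ [u]) t]
      simp [List.append_assoc, List.cons_append]

lemma pvFilter_nil (ps : List (Int × Int)) (t : Int) (h : t ∉ ps.map (fun q => q.1)) :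
    ps.filter (fun q => q.1 == t) = [] := by
  rw [List.filter_eq_nil_iff]
  intro q hq hbeq
  exact h (List.mem_map.mpr ⟨q, hq, by simpa using (beq_iff_eq.mp hbeq)⟩)

lemma pvFilter_ne_nil (ps : List (Int × Int)) (t : Int) (h : t ∈ ps.map (fun q => q.1)) :
    ps.filter (fun q => q.1 == t) ≠ [] := by
  rcases List.mem_map.mp h with ⟨q, hq, rfl⟩
  intro hnil
  have : q ∈ ps.filter (fun q' => q'.1 == q.1) := List.mem_filter.mpr ⟨hq, by simp⟩
  rw [hnil] at this
  simp at this

lemma pvMinOf_append_ne (ps : List (Int × Int)) (t v t' : Int) (h : t' ≠ t) :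
    pvMinOf (ps ++ [(t, v)]) t' = pvMinOf ps t' := by
  unfold pvMinOf
  rw [List.filter_append]
  have : ([(t, v)].filter (fun q => q.1 == t')) = [] := by simp [Ne.symm h]
  rw [this, List.append_nil]

lemma pvMinOf_append_self (ps : List (Int × Int)) (t v : Int) (h : t ∈ ps.map (fun q => q.1)) :
    pvMinOf (ps ++ [(t, v)]) t = min (pvMinOf ps t) v := by
  unfold pvMinOf
  rw [List.filter_append]
  have h1 : ([(t, v)].filter (fun q => q.1 == t)) = [(t, v)] := by simp
  rw [h1, List.map_append]
  have h2 : ((ps.filter (fun q => q.1 == t)).map (fun q => q.2)) ≠ [] := by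
    simp only [ne_eq, List.map_eq_nil_iff]
    exact pvFilter_ne_nil ps t h
  simp only [List.map_cons, List.map_nil]
  rw [pvMfold_append, if_neg h2]

lemma pvMinOf_append_fresh (ps : List (Int × Int)) (t v : Int) (h : t ∉ ps.map (fun q => q.1)) :
    pvMinOf (ps ++ [(t, v)]) t = v := by
  unfold pvMinOf
  rw [List.filter_append, pvFilter_nil ps t h]
  simp [pvMfold]

lemma pvCandEq : ∀ (tg2 : List Int) (s : Nat) (tp : List Int), tg2.length + s ≤ tp.length → ∀ tv : Int,
    ((PySem.List.enumerate tg2 (s : Int)).filter (fun q => q.2 == tv)).map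
        (fun q => (PySem.List.pyGet? tp q.1).getD 0)
      = ((tg2.zip (tp.drop s)).filter (fun q => q.1 == tv)).map (fun q => q.2) := by
  intro tg2
  induction tg2 with
  | nil => intro s tp h tv; simp [PySem.List.enumerate_nil]
  | cons t r ih =>
    intro s tp h tv
    have hs : s < tp.length := by simp at h; omega
    rw [PySem.List.enumerate_cons]
    have hdrop : tp.drop s = tp[s] :: tp.drop (s + 1) := List.drop_eq_getElem_cons hs
    rw [hdrop, List.zip_cons_cons]
    have hrec := ih (s + 1) tp (by simp at h ⊢; omega) tv
    have hcast : (s : Int) + 1 = ((s + 1 : Nat) : Int) := by push_cast; ring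
    by_cases hb : t == tv
    · rw [List.filter_cons_of_pos (by simpa using hb), List.filter_cons_of_pos (by simpa using hb)]
      simp only [List.map_cons]
      rw [hcast, hrec]
      congr 1
      simp [PySem.List.pyGet?_natCast, List.getElem?_eq_getElem hs]
    · rw [List.filter_cons_of_neg (by simpa using hb), List.filter_cons_of_neg (by simpa using hb)]
      rw [hcast, hrec]

lemma pvFidx (tp : List Int) : ∀ v : Int,
    ((PySem.List.enumerate tp).foldl
        (fun d q => if d.contains q.2 then d else d.insert q.2 q.1)
        (PySem.Dict.empty : PySem.Dict Int Int)).get? v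
      = (PySem.List.index? tp v).map (fun k => (k : Int)) := by
  induction tp using List.reverseRecOn with
  | nil => intro v; simp [PySem.List.enumerate_nil, PySem.List.index?, PySem.Dict.get?_empty]
  | append_singleton l x ih =>
    intro v
    rw [PySem.List.enumerate_append, List.foldl_append]
    rw [show PySem.List.enumerate [x] ((0 : Int) + l.length) = [((l.length : Int), x)] by
      rw [PySem.List.enumerate_cons, PySem.List.enumerate_nil]; norm_num]
    simp only [List.foldl_cons, List.foldl_nil]
    set d := (PySem.List.enumerate l).foldl
        (fun d q => if d.contains q.2 then d else d.insert q.2 q.1)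
        (PySem.Dict.empty : PySem.Dict Int Int) with hd
    have hcont : d.contains x = (PySem.List.index? l x).isSome := by
      rw [PySem.Dict.contains_eq_isSome_get?, ih x]
      cases PySem.List.index? l x <;> simp
    by_cases hx : x ∈ l
    · rw [hcont, (PySem.List.index?_isSome_iff l x).mpr hx, if_pos rfl, ih v]
      by_cases hv : v ∈ l
      · rw [PySem.List.index?_append_of_mem _ hv]
      · have h1 : PySem.List.index? l v = none := (PySem.List.index?_eq_none_iff _ _).mpr hv
        have h2 : PySem.List.index? (l ++ [x]) v = none := by
          rw [PySem.List.index?_eq_none_iff]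
          simp only [List.mem_append, List.mem_singleton]
          rintro (h | rfl)
          · exact hv h
          · exact hv hx
        rw [h1, h2]
    · have : d.contains x = false := by
        rw [hcont]
        simp [hx]
      rw [this, if_neg (by simp)]
      rw [PySem.Dict.get?_insert]
      by_cases hvx : v = x
      · subst hvx
        rw [if_pos rfl, PySem.List.index?_append_singleton_self l v hx]
        simp
      · rw [if_neg hvx, ih v]
        by_cases hv : v ∈ l
        · rw [PySem.List.index?_append_of_mem _ hv]
        · have h1 : PySem.List.index? l v = none := (PySem.List.index?_eq_none_iff _ _).mpr hv
          have h2 : PySem.List.index? (l ++ [x]) v = none := by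
            rw [PySem.List.index?_eq_none_iff]
            simp only [List.mem_append, List.mem_singleton]
            rintro (h | rfl)
            · exact hv h
            · exact hvx rfl
          rw [h1, h2]

lemma pvMinsNodup : ∀ (ps : List (Int × Int)) (d : PySem.Dict Int Int), d.keys.Nodup →
    (ps.foldl
        (fun d q => match d.get? q.1 with
          | none => d.insert q.1 q.2
          | some v0 => if q.2 < v0 then d.insert q.1 q.2 else d)
        d).keys.Nodup := by
  intro ps
  induction ps with
  | nil => intro d h; simpa
  | cons q r ih =>
    intro d h
    simp only [List.foldl_cons]
    apply ih
    cases hg : d.get? q.1 with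
    | none => exact PySem.Dict.nodup_keys_insert d q.1 q.2 h
    | some v0 =>
      dsimp only
      by_cases hlt : q.2 < v0
      · rw [if_pos hlt]; exact PySem.Dict.nodup_keys_insert d q.1 q.2 h
      · rwa [if_neg hlt]

lemma pvMinsItems : ∀ ps : List (Int × Int),
    (ps.foldl
        (fun d q => match d.get? q.1 with
          | none => d.insert q.1 q.2
          | some v0 => if q.2 < v0 then d.insert q.1 q.2 else d)
        (PySem.Dict.empty : PySem.Dict Int Int)).items
      = (pvNew [] (ps.map (fun q => q.1))).map (fun t => (t, pvMinOf ps t)) := by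
  intro ps
  induction ps using List.reverseRecOn with
  | nil => simp [pvNew, PySem.Dict.empty]
  | append_singleton ps q ih =>
    obtain ⟨t, v⟩ := q
    rw [List.foldl_append]
    simp only [List.foldl_cons, List.foldl_nil]
    set d := ps.foldl
        (fun d q => match d.get? q.1 with
          | none => d.insert q.1 q.2
          | some v0 => if q.2 < v0 then d.insert q.1 q.2 else d)
        (PySem.Dict.empty : PySem.Dict Int Int) with hd
    have hnodup : d.keys.Nodup := pvMinsNodup ps PySem.Dict.empty (by simp [PySem.Dict.empty])
    set F := pvNew [] (ps.map (fun q => q.1)) with hF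
    have hkeys : d.keys = F := by
      show d.items.map (fun p => p.1) = F
      rw [ih, List.map_map]
      exact List.map_id' _
    have hmapfst : (ps ++ [(t, v)]).map (fun q => q.1) = ps.map (fun q => q.1) ++ [t] := by
      simp
    rw [hmapfst, pvNew_append, List.nil_append]
    by_cases hm : t ∈ F
    · have htps : t ∈ ps.map (fun q => q.1) := pvNew_subset _ [] t hm
      have hcF : F.contains t = true := List.contains_iff_mem.mpr hm
      rw [hcF, if_pos rfl, List.append_nil]
      have hmem : (t, pvMinOf ps t) ∈ d.items := by
        rw [ih]; exact List.mem_map.mpr ⟨t, hm, rfl⟩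
      have hget : d.get? t = some (pvMinOf ps t) :=
        PySem.Dict.get?_of_mem_items d hmem hnodup
      rw [hget]
      dsimp only
      have hrepl : ∀ (w : Int), (d.insert t w).items
          = F.map (fun t' => if t' = t then (t, w) else (t', pvMinOf ps t')) := by
        intro w
        rw [PySem.Dict.items_insert_of_contains]
        · rw [ih, List.map_map]
          apply List.map_congr_left
          intro t' _
          by_cases h' : t' = t <;> simp [h']
        · rw [PySem.Dict.contains_iff_mem_keys, hkeys]; exact hm
      by_cases hlt : v < pvMinOf ps t
      · rw [if_pos hlt, hrepl v]
        apply List.map_congr_left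
        intro t' ht'
        by_cases h' : t' = t
        · subst h'
          rw [if_pos rfl, pvMinOf_append_self ps t' v htps]
          rw [min_eq_right (le_of_lt hlt)]
        · rw [if_neg h', pvMinOf_append_ne ps t v t' h']
      · rw [if_neg hlt, ih]
        apply List.map_congr_left
        intro t' ht'
        by_cases h' : t' = t
        · subst h'
          rw [pvMinOf_append_self ps t' v htps]
          rw [min_eq_left (le_of_not_gt hlt)]
        · rw [pvMinOf_append_ne ps t v t' h']
    · have htps : t ∉ ps.map (fun q => q.1) := fun h => by
        rcases mem_pvNew _ [] t h with h' | h'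
        · simp at h'
        · exact hm h'
      have hcF : F.contains t = false := by
        by_contra h
        exact hm (List.contains_iff_mem.mp (by simpa using h))
      rw [hcF, if_neg Bool.false_ne_true]
      have hget : d.get? t = none := by
        rw [PySem.Dict.get?_eq_none_iff_not_mem_keys, hkeys]; exact hm
      rw [hget]
      dsimp only
      rw [PySem.Dict.items_insert_of_not_contains]
      · rw [ih, List.map_append]
        congr 1
        · apply List.map_congr_left
          intro t' ht'
          have h' : t' ≠ t := fun h => hm (h ▸ ht')
          rw [pvMinOf_append_ne ps t v t' h']
        · simp [pvMinOf_append_fresh ps t v htps]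
      · rw [PySem.Dict.contains_eq_isSome_get?, hget]
        rfl

lemma pvFoldlEnum {β : Type} (g : β → Int → β) (l : List Int) (s : Int) (init : β) :
    (PySem.List.enumerate l s).foldl (fun acc p => g acc p.2) init = l.foldl g init := by
  conv_rhs => rw [← PySem.List.map_snd_enumerate l s]
  rw [List.foldl_map]

lemma pvFoldA (mv fv : Int → Int) : ∀ (l a b c : List Int),
    l.foldl (pvStepA mv fv) (a, b, c)
      = (a ++ (pvNew b l).map mv, b ++ pvNew b l, c ++ (pvNew b l).map fv) := by
  intro l
  induction l with
  | nil => intro a b c; simp [pvNew]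
  | cons t r ih =>
    intro a b c
    simp only [List.foldl_cons]
    unfold pvNew
    by_cases hc : b.contains t
    · rw [show pvStepA mv fv (a, b, c) t = (a, b, c) from by simp [pvStepA, show t ∈ b from List.contains_iff_mem.mp hc], if_pos hc]
      exact ih a b c
    · rw [show pvStepA mv fv (a, b, c) t = (a ++ [mv t], b ++ [t], c ++ [fv t]) from by
        simp [pvStepA, show t ∉ b from fun h => hc (List.contains_iff_mem.mpr h)], if_neg hc]
      rw [ih (a ++ [mv t]) (b ++ [t]) (c ++ [fv t])]
      simp [List.append_assoc]

-- ===== VERDICT (by name: the statement is the Claim_ definition above) =====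
theorem find_initial_min_point_with_feature_spec : Claim_equal_find_initial_min_point_with_feature := by
  intro tp tg ft _hDom hPre
  obtain ⟨h1, _h2⟩ := hPre
  unfold Spec_find_initial_min_point_with_feature
  have hfst : (tg.zip tp).map (fun q => q.1) = tg := by
    rw [show (fun q : Int × Int => q.1) = Prod.fst from rfl, List.map_fst_zip h1]
  set mv : Int → Int := pvMinOf (tg.zip tp) with hmv
  set fv : Int → Int := fun t => pvFeat tp ft (pvMinOf (tg.zip tp) t) with hfv
  set F : List Int := pvNew [] tg with hFdef
  -- A-side characterization
  have hfun : (fun (acc : List Int × List Int × List Int) (p : Int × Int) =>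
      if acc.2.1.contains p.2 then acc
      else
        let cand := ((PySem.List.enumerate tg).filter (fun q => q.2 == p.2)).map
          (fun q => (PySem.List.pyGet? tp q.1).getD 0)
        let m := (PySem.List.min? cand (fun y => y)).getD 0
        (acc.1 ++ [m], acc.2.1 ++ [p.2],
          acc.2.2 ++ [(PySem.List.pyGet? ft
            (((PySem.List.index? tp m).getD 0 : Nat) : Int)).getD 0]))
      = fun acc p => pvStepA mv fv acc p.2 := by
    funext acc p
    unfold pvStepA
    by_cases hc : acc.2.1.contains p.2
    · rw [if_pos hc, if_pos hc]
    · rw [if_neg hc, if_neg hc]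
      have hc2 := pvCandEq tg 0 tp (by omega) p.2
      norm_num at hc2
      show (acc.1 ++ [(PySem.List.min? (((PySem.List.enumerate tg).filter (fun q => q.2 == p.2)).map
              (fun q => (PySem.List.pyGet? tp q.1).getD 0)) (fun y => y)).getD 0],
            acc.2.1 ++ [p.2],
            acc.2.2 ++ [(PySem.List.pyGet? ft
              (((PySem.List.index? tp ((PySem.List.min? (((PySem.List.enumerate tg).filter (fun q => q.2 == p.2)).map
                (fun q => (PySem.List.pyGet? tp q.1).getD 0)) (fun y => y)).getD 0)).getD 0 : Nat) : Int)).getD 0])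
          = _
      rw [hc2, pvMin_getD]
      rfl
  have hA : find_initial_min_point_with_feature tp tg ft
      = (F.map mv, F, F.map fv) := by
    have h0 : find_initial_min_point_with_feature tp tg ft
        = (PySem.List.enumerate tg).foldl (fun acc p => pvStepA mv fv acc p.2) ([], [], []) := by
      exact congrArg (fun g => (PySem.List.enumerate tg).foldl g ([], [], [])) hfun
    rw [h0, pvFoldlEnum (pvStepA mv fv), pvFoldA]
    simp only [List.nil_append, ← hFdef]
  -- B-side characterization
  have hitems := pvMinsItems (tg.zip tp)
  rw [hfst] at hitems
  set dmins := (tg.zip tp).foldl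
      (fun d q => match d.get? q.1 with
        | none => d.insert q.1 q.2
        | some v0 => if q.2 < v0 then d.insert q.1 q.2 else d)
      (PySem.Dict.empty : PySem.Dict Int Int) with hdmins
  set dfidx := (PySem.List.enumerate tp).foldl
      (fun d q => if d.contains q.2 then d else d.insert q.2 q.1)
      (PySem.Dict.empty : PySem.Dict Int Int) with hdfidx
  have hvals : dmins.values = F.map mv := by
    show dmins.items.map (fun p => p.2) = F.map mv
    rw [hitems, List.map_map]
    rfl
  have hkeys : dmins.keys = F := by
    show dmins.items.map (fun p => p.1) = F
    rw [hitems, List.map_map]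
    exact List.map_id' _
  have hB : find_initial_min_point_with_feature_alt tp tg ft
      = (dmins.values, dmins.keys,
          dmins.values.map (fun m => (PySem.List.pyGet? ft ((dfidx.get? m).getD 0)).getD 0)) := rfl
  rw [hA, hB, hvals, hkeys, List.map_map]
  refine congrArg (fun z => (F.map mv, F, z)) ?_
  apply List.map_congr_left
  intro t _
  show pvFeat tp ft (mv t) = (PySem.List.pyGet? ft ((dfidx.get? (mv t)).getD 0)).getD 0
  rw [hdfidx, pvFidx tp (mv t)]
  unfold pvFeat
  cases PySem.List.index? tp (mv t) with
  | none => simp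
  | some k => simp
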